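-- pv_equiv track=rewrite | github.com/roman-grs-pit/covariance-mocks | tests/integration_core.py | parse_shell_args
-- ===== SOURCE A (Python) =====
-- from typing import Dict, List, Optional, Tuple
--
-- def parse_shell_args(args: List[str]) -> Tuple[bool, bool, bool]:
--     """Parse shell script style arguments.
--
--     Returns:
--         Tuple of (force_run, test_mode, verbose)
--     """
--     force_run = False
--     test_mode = False
--     verbose = False
--
--     for arg in args:
--         if arg == "--force":
--             force_run = True
--         elif arg == "--test":
--             test_mode = True
--         elif arg == "--verbose" or arg == "-v":
--             verbose = True
--         else:
--             raise ValueError(f"Unknown argument: {arg}")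
--
--     return force_run, test_mode, verbose
-- ===== SOURCE B (Python) =====
-- def parse_shell_args(args):
--     """Parse shell script style arguments.
--
--     Returns:
--         Tuple of (force_run, test_mode, verbose)
--     """
--     allowed = {"--force", "--test", "--verbose", "-v"}
--     for arg in args:
--         if arg not in allowed:
--             raise ValueError(f"Unknown argument: {arg}")
--     return ("--force" in args, "--test" in args, "--verbose" in args or "-v" in args)
-- ===== Notes on version B (the rewrite author's own statement) =====
-- stated objective: idiomatic
-- what changed: Replaced the single accumulator loop with an in-order validation pass followed by direct membership tests that compute each flag independently.
import Mathlib
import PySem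

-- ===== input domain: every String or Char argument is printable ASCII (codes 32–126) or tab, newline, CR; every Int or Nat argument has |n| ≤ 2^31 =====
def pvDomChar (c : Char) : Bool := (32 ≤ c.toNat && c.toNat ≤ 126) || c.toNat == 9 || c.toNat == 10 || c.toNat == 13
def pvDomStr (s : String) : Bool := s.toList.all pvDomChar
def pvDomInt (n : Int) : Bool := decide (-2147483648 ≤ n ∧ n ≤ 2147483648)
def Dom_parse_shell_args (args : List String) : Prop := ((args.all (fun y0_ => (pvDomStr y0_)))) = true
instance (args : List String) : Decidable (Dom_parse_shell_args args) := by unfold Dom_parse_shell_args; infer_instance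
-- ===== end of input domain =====

-- B replaces A's single accumulator loop by a validation pass plus three independent membership tests (idiomatic); proved equal on Pre_ (inputs with only known flags; A raises ValueError otherwise, and so does B).

-- ===== PORT A =====
-- loop over args, flipping the matching accumulator; the 'else' branch raises ValueError,
-- which Pre_ excludes (the port keeps the state there, but nothing is claimed on such inputs)
def parse_shell_args_loop (args : List String) (force_run test_mode verbose : Bool) : Bool × Bool × Bool :=
  match args with
  | [] => (force_run, test_mode, verbose)
  | arg :: rest =>
    if arg = "--force" then parse_shell_args_loop rest true test_mode verbose
    else if arg = "--test" then parse_shell_args_loop rest force_run true verbose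
    else if arg = "--verbose" ∨ arg = "-v" then parse_shell_args_loop rest force_run test_mode true
    else parse_shell_args_loop rest force_run test_mode verbose  -- raise ValueError: excluded by Pre_

def parse_shell_args (args : List String) : Bool × Bool × Bool :=
  parse_shell_args_loop args false false false

-- ===== PORT B =====
def pvAllowed : List String := ["--force", "--test", "--verbose", "-v"]

def parse_shell_args_alt (args : List String) : Bool × Bool × Bool :=
  -- validation pass (raise excluded by Pre_), then independent membership tests
  (args.contains "--force", args.contains "--test",
   args.contains "--verbose" || args.contains "-v")

-- ===== PRECONDITION & SPEC =====
-- Pre_ excludes exactly the inputs containing an argument outside the allowed set, on which A raises ValueError (and so does B).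
def Pre_parse_shell_args (args : List String) : Prop := ∀ a ∈ args, a ∈ pvAllowed
instance (args : List String) : Decidable (Pre_parse_shell_args args) := by unfold Pre_parse_shell_args; infer_instance
def pvWitness_parse_shell_args : List String := ["--force", "-v"]
def Spec_parse_shell_args (args : List String) (out : Bool × Bool × Bool) : Prop := out = parse_shell_args_alt args
instance (args : List String) (out : Bool × Bool × Bool) : Decidable (Spec_parse_shell_args args out) := by unfold Spec_parse_shell_args; infer_instance

-- ===== CLAIM (what is proved, stated in full; the proofs are below) =====
def Claim_equal_parse_shell_args : Prop := ∀ (args : List String), Dom_parse_shell_args args → Pre_parse_shell_args args → Spec_parse_shell_args args (parse_shell_args args)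

-- ===== LEMMAS AND PROOFS =====
theorem parse_shell_args_loop_eq (args : List String) (f t v : Bool)
    (h : Pre_parse_shell_args args) :
    parse_shell_args_loop args f t v =
      (f || args.contains "--force", t || args.contains "--test",
       v || (args.contains "--verbose" || args.contains "-v")) := by
  induction args generalizing f t v with
  | nil => simp [parse_shell_args_loop]
  | cons a rest ih =>
    have ha : a ∈ pvAllowed := h a (List.mem_cons_self)
    have hrest : Pre_parse_shell_args rest := fun x hx => h x (List.mem_cons_of_mem _ hx)
    simp only [pvAllowed, List.mem_cons, List.not_mem_nil, or_false] at ha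
    rcases ha with rfl | rfl | rfl | rfl <;>
      simp [parse_shell_args_loop, ih _ _ _ hrest, List.contains_cons, Bool.or_comm]

-- ===== VERDICT (by name: the statement is the Claim_ definition above) =====
theorem parse_shell_args_spec : Claim_equal_parse_shell_args := by
  intro args _ hpre
  unfold Spec_parse_shell_args parse_shell_args parse_shell_args_alt
  simp [parse_shell_args_loop_eq args false false false hpre]
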